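-- pv_equiv track=rewrite | github.com/Roktar/codewars | lang/python/C%/catandmouse.py | cat_mouse
-- ===== SOURCE A (Python) =====
-- def cat_mouse(map_, moves):
--     map = toArray(map_ + " ")
--
--     cx, cy = getIndex(map, 'C')
--     mx, my = getIndex(map, 'm')
--
--     if cx == -1 or mx == -1 :
--         return "boring without two animals"
--
--     while moves > 0 :
--         if cx == mx and cy == my :
--             return "Caught!"
--
--         if cx != mx :
--             cx, moves = calculateCatLocation(cx, mx, moves)
--         if cy != my :
--             cy, moves = calculateCatLocation(cy, my, moves)
--
--     return "Escaped!"
--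
-- def toArray(data) :
--     map = list()
--     sub = list()
--
--     for i in range(len(data)) :
--         if data[i] == '.' or data[i] == 'C' or data[i] == 'm' :
--             sub.append(data[i])
--         else :
--             map.append(sub)
--             sub = list()
--     return map
--
-- def getIndex(data, ch) :
--     for i in range(len(data)) :
--         for j, c in enumerate(data[i]) :
--             if c == ch :
--                 return i, j
--     return -1, -1
--
-- def calculateCatLocation(cat, mouse, moves) :
--     if moves < 1 :
--         return (cat, moves)
--     return (cat+1, moves-1) if cat < mouse else (cat-1, moves-1)
-- ===== SOURCE B (Python) =====
-- def cat_mouse(map_, moves):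
--     # One pass over the raw string: rows are segments split by any non-'.Cm'
--     # character; record the first 'C' and first 'm'. Then a closed-form test
--     # (strict Manhattan-distance comparison) replaces the chase simulation.
--     row = col = 0
--     cat = mouse = None
--     for ch in map_:
--         if ch == '.' or ch == 'C' or ch == 'm':
--             if ch == 'C' and cat is None:
--                 cat = (row, col)
--             if ch == 'm' and mouse is None:
--                 mouse = (row, col)
--             col += 1
--         else:
--             row += 1
--             col = 0
--     if cat is None or mouse is None:
--         return "boring without two animals"
--     dist = abs(cat[0] - mouse[0]) + abs(cat[1] - mouse[1])
--     return "Caught!" if moves > dist else "Escaped!"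
-- ===== Notes on version B (the rewrite author's own statement) =====
-- stated objective: simpler
-- what changed: B replaces A's two-phase parse (build a list of rows, then two nested index scans) with one single pass over the raw string recording the first 'C' and first 'm', and replaces the whole move-by-move chase loop with a closed-form strict comparison of moves against the Manhattan distance.
import Mathlib
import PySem

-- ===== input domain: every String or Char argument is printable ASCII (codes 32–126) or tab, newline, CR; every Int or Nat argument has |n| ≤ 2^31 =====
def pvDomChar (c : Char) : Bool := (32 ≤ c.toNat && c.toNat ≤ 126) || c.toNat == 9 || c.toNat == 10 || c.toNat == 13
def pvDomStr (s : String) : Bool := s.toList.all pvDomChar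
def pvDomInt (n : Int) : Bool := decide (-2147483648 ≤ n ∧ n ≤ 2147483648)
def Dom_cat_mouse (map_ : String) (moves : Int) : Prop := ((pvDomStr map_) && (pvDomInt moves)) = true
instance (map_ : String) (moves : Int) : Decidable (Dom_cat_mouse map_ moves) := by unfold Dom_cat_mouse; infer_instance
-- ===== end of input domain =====

-- B: one pass over the raw string for the first 'C'/'m' plus a closed-form
-- Manhattan-distance test replaces A's row-list parse, nested scans and chase loop (simpler).

-- ===== PORT A =====

-- data[i] == '.' or data[i] == 'C' or data[i] == 'm'  (shared by both ports)
def isCell (c : Char) : Bool := c = '.' || c = 'C' || c = 'm'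

-- one step of toArray's for-loop over (map, sub)
def toArrayStep (st : List (List Char) × List Char) (c : Char) : List (List Char) × List Char :=
  if isCell c then (st.1, st.2 ++ [c]) else (st.1 ++ [st.2], [])

-- toArray(data): builds the row list, discards the trailing sub
def toArray (data : List Char) : List (List Char) :=
  (data.foldl toArrayStep ([], [])).1

-- inner loop of getIndex: 'for j, c in enumerate(data[i]): if c == ch: return j'
def findInRow : List Char → Char → Nat → Option Int
  | [], _, _ => none
  | c :: rest, ch, j => if c = ch then some (Int.ofNat j) else findInRow rest ch (j + 1)

-- outer loop of getIndex over the rows (early return modelled by Option)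
def getIndexAux : List (List Char) → Char → Nat → Option (Int × Int)
  | [], _, _ => none
  | r :: rest, ch, i =>
    match findInRow r ch 0 with
    | some j => some (Int.ofNat i, j)
    | none => getIndexAux rest ch (i + 1)

-- getIndex(data, ch): (-1, -1) when not found
def getIndex (data : List (List Char)) (ch : Char) : Int × Int :=
  (getIndexAux data ch 0).getD (-1, -1)

-- calculateCatLocation(cat, mouse, moves)
def calcLoc (cat mouse moves : Int) : Int × Int :=
  if moves < 1 then (cat, moves)
  else if cat < mouse then (cat + 1, moves - 1) else (cat - 1, moves - 1)

-- the 'while moves > 0' chase loop of A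
def chaseLoop (cx cy mx my moves : Int) : String :=
  if 0 < moves then
    if cx = mx ∧ cy = my then "Caught!"
    else
      let p1 := if cx ≠ mx then calcLoc cx mx moves else (cx, moves)
      let p2 := if cy ≠ my then calcLoc cy my p1.2 else (cy, p1.2)
      chaseLoop p1.1 p2.1 mx my p2.2
  else "Escaped!"
termination_by moves.toNat
decreasing_by
  simp only [calcLoc]
  split_ifs <;> simp_all <;> omega

def cat_mouse (map_ : String) (moves : Int) : String :=
  let map := toArray (map_ ++ " ").toList
  let c := getIndex map 'C'
  let m := getIndex map 'm'
  if c.1 = -1 ∨ m.1 = -1 then "boring without two animals"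
  else chaseLoop c.1 c.2 m.1 m.2 moves

-- ===== PORT B =====

-- B's single pass: row/col counters, first occurrences of 'C' and 'm'
def scanMap : List Char → Nat → Nat → Option (Nat × Nat) → Option (Nat × Nat) →
    Option (Nat × Nat) × Option (Nat × Nat)
  | [], _, _, cat, mouse => (cat, mouse)
  | c :: rest, row, col, cat, mouse =>
    if isCell c then
      scanMap rest row (col + 1)
        (if c = 'C' ∧ cat = none then some (row, col) else cat)
        (if c = 'm' ∧ mouse = none then some (row, col) else mouse)
    else
      scanMap rest (row + 1) 0 cat mouse

def cat_mouse_alt (map_ : String) (moves : Int) : String :=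
  match scanMap map_.toList 0 0 none none with
  | (some c, some m) =>
      if ((((c.1 : Int) - (m.1 : Int)).natAbs + ((c.2 : Int) - (m.2 : Int)).natAbs : Nat) : Int) < moves
      then "Caught!" else "Escaped!"
  | _ => "boring without two animals"

-- ===== PRECONDITION & SPEC =====
def Spec_cat_mouse (map_ : String) (moves : Int) (out : String) : Prop := out = cat_mouse_alt map_ moves
instance (map_ : String) (moves : Int) (out : String) : Decidable (Spec_cat_mouse map_ moves out) := by unfold Spec_cat_mouse; infer_instance

-- ===== CLAIM (what is proved, stated in full; the proofs are below) =====
def Claim_equal_cat_mouse : Prop := ∀ (map_ : String) (moves : Int), Dom_cat_mouse map_ moves → Spec_cat_mouse map_ moves (cat_mouse map_ moves)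

-- ===== LEMMAS AND PROOFS =====

-- first occurrence of ch in a single scan (common characterisation of both parses)
def posOf : List Char → Char → Nat → Nat → Option (Nat × Nat)
  | [], _, _, _ => none
  | c :: rest, ch, row, col =>
    if isCell c then
      if c = ch then some (row, col) else posOf rest ch row (col + 1)
    else posOf rest ch (row + 1) 0

theorem scanMap_eq (cs : List Char) : ∀ (row col : Nat) (cat mouse : Option (Nat × Nat)),
    scanMap cs row col cat mouse =
      (cat.or (posOf cs 'C' row col), mouse.or (posOf cs 'm' row col)) := by
  induction cs with
  | nil => intro row col cat mouse; cases cat <;> cases mouse <;> simp [scanMap, posOf]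
  | cons c rest ih =>
    intro row col cat mouse
    by_cases hc : isCell c
    · rw [scanMap]
      simp only [hc, if_true, ih]
      cases cat <;> cases mouse <;>
        by_cases h1 : c = 'C' <;> by_cases h2 : c = 'm' <;> simp_all [posOf]
    · rw [scanMap]
      simp [hc, ih, posOf]

theorem foldl_toArrayStep_acc (cs : List Char) : ∀ (acc : List (List Char)) (sub : List Char),
    cs.foldl toArrayStep (acc, sub) =
      (acc ++ (cs.foldl toArrayStep ([], sub)).1, (cs.foldl toArrayStep ([], sub)).2) := by
  induction cs with
  | nil => intro acc sub; simp
  | cons c rest ih =>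
    intro acc sub
    by_cases hc : isCell c
    · simp only [List.foldl_cons, toArrayStep, hc, if_true]
      exact ih acc (sub ++ [c])
    · simp only [List.foldl_cons, toArrayStep, hc, Bool.false_eq_true, if_false]
      simp only [List.nil_append]
      rw [ih (acc ++ [sub]) [], ih [sub] []]
      simp

theorem findInRow_append (pre : List Char) : ∀ (r : List Char) (ch : Char) (j : Nat),
    ch ∉ pre → findInRow (pre ++ r) ch j = findInRow r ch (j + pre.length) := by
  induction pre with
  | nil => intro r ch j _; simp only [List.nil_append, List.length_nil, Nat.add_zero]
  | cons c rest ih =>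
    intro r ch j h
    simp only [List.mem_cons, not_or] at h
    rw [List.cons_append, findInRow]
    rw [if_neg (fun hh => h.1 hh.symm), ih r ch (j + 1) h.2]
    simp [Nat.add_comm, Nat.add_left_comm]

theorem findInRow_none (r : List Char) (ch : Char) (j : Nat) (h : ch ∉ r) :
    findInRow r ch j = none := by
  have := findInRow_append r [] ch j h
  simpa [findInRow] using this

-- shape of the first produced row: it starts with the pending sub
theorem firstRow_shape (cs : List Char) : ∀ (sub : List Char),
    ∃ t rest, ((cs ++ [' ']).foldl toArrayStep ([], sub)).1 = (sub ++ t) :: rest := by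
  induction cs with
  | nil =>
    intro sub
    exact ⟨[], [], by simp [toArrayStep, isCell]⟩
  | cons c rest ih =>
    intro sub
    by_cases hc : isCell c
    · obtain ⟨t, r, hr⟩ := ih (sub ++ [c])
      exact ⟨c :: t, r, by
        simp only [List.cons_append, List.foldl_cons, toArrayStep, hc, if_true]
        rw [hr]; simp⟩
    · refine ⟨[], ?_, ?_⟩
      · exact (((rest ++ [' ']).foldl toArrayStep ([], [])).1)
      · simp only [List.cons_append, List.foldl_cons, toArrayStep, hc, Bool.false_eq_true,
          if_false]
        rw [foldl_toArrayStep_acc]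
        simp

-- the main parse correspondence
theorem getIndexAux_posOf (cs : List Char) : ∀ (sub : List Char) (ch : Char) (i : Nat),
    isCell ch = true → ch ∉ sub →
    getIndexAux (((cs ++ [' ']).foldl toArrayStep ([], sub)).1) ch i =
      (posOf cs ch i sub.length).map (fun p => (Int.ofNat p.1, Int.ofNat p.2)) := by
  induction cs with
  | nil =>
    intro sub ch i hcell hsub
    simp [toArrayStep, isCell, getIndexAux, findInRow_none _ _ _ hsub, posOf]
  | cons c rest ih =>
    intro sub ch i hcell hsub
    by_cases hc : isCell c
    · by_cases hch : c = ch
      · subst hch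
        obtain ⟨t, r, hr⟩ := firstRow_shape rest (sub ++ [c])
        simp only [List.cons_append, List.foldl_cons, toArrayStep, hc, if_true]
        rw [hr]
        have : sub ++ [c] ++ t = sub ++ (c :: t) := by simp
        rw [this, getIndexAux, findInRow_append sub (c :: t) c 0 hsub]
        simp [findInRow, posOf, hc]
      · simp only [List.cons_append, List.foldl_cons, toArrayStep, hc, if_true]
        have hns : ch ∉ sub ++ [c] := by
          intro h
          rcases List.mem_append.1 h with h | h
          · exact hsub h
          · simp only [List.mem_singleton] at h
            exact hch h.symm
        rw [ih (sub ++ [c]) ch i hcell hns]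
        rw [posOf, if_pos hc, if_neg hch]
        simp
    · rw [List.cons_append, List.foldl_cons, toArrayStep, if_neg hc]
      dsimp only
      rw [foldl_toArrayStep_acc]
      simp only [List.nil_append, List.singleton_append]
      rw [getIndexAux.eq_def]
      dsimp only
      rw [findInRow_none _ _ _ hsub]
      rw [ih [] ch (i + 1) hcell (by simp)]
      rw [posOf]
      simp [hc]

-- the chase loop is the strict Manhattan test
theorem chaseLoop_eq_aux (n : Nat) : ∀ (cx cy mx my moves : Int), moves.toNat ≤ n →
    chaseLoop cx cy mx my moves =
      if (((cx - mx).natAbs + (cy - my).natAbs : Nat) : Int) < moves then "Caught!" else "Escaped!" := by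
  induction n with
  | zero =>
    intro cx cy mx my moves hm
    rw [chaseLoop]
    rw [if_neg (by omega), if_neg (by omega)]
  | succ n ih =>
    intro cx cy mx my moves hm
    rw [chaseLoop]
    by_cases hpos : 0 < moves
    · rw [if_pos hpos]
      by_cases heq : cx = mx ∧ cy = my
      · rw [if_pos heq]
        obtain ⟨h1, h2⟩ := heq
        subst h1; subst h2
        rw [if_pos (by simp; omega)]
      · rw [if_neg heq]
        by_cases hx : cx = mx
        · have hy : cy ≠ my := fun h => heq ⟨hx, h⟩
          rw [if_neg (not_not_intro hx)]
          dsimp only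
          rw [if_pos hy]
          unfold calcLoc
          rw [if_neg (show ¬ moves < 1 by omega)]
          by_cases hlt : cy < my
          · rw [if_pos hlt]; dsimp only
            rw [ih cx (cy + 1) mx my (moves - 1) (by omega)]
            subst hx
            exact if_congr (by omega) rfl rfl
          · rw [if_neg hlt]; dsimp only
            rw [ih cx (cy - 1) mx my (moves - 1) (by omega)]
            subst hx
            exact if_congr (by have := hy; omega) rfl rfl
        · rw [if_pos hx]
          unfold calcLoc
          rw [if_neg (show ¬ moves < 1 by omega)]
          by_cases hlt : cx < mx
          · rw [if_pos hlt]; dsimp only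
            by_cases hy : cy = my
            · rw [if_neg (not_not_intro hy)]; dsimp only
              rw [ih (cx + 1) cy mx my (moves - 1) (by omega)]
              subst hy
              exact if_congr (by omega) rfl rfl
            · rw [if_pos hy]
              by_cases h1 : moves - 1 < 1
              · rw [if_pos h1]; dsimp only
                rw [ih (cx + 1) cy mx my (moves - 1) (by omega)]
                exact if_congr (by omega) rfl rfl
              · rw [if_neg h1]
                by_cases h2 : cy < my
                · rw [if_pos h2]; dsimp only
                  rw [ih (cx + 1) (cy + 1) mx my (moves - 1 - 1) (by omega)]
                  exact if_congr (by omega) rfl rfl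
                · rw [if_neg h2]; dsimp only
                  rw [ih (cx + 1) (cy - 1) mx my (moves - 1 - 1) (by omega)]
                  exact if_congr (by have := hy; omega) rfl rfl
          · rw [if_neg hlt]; dsimp only
            by_cases hy : cy = my
            · rw [if_neg (not_not_intro hy)]; dsimp only
              rw [ih (cx - 1) cy mx my (moves - 1) (by omega)]
              subst hy
              exact if_congr (by omega) rfl rfl
            · rw [if_pos hy]
              by_cases h1 : moves - 1 < 1
              · rw [if_pos h1]; dsimp only
                rw [ih (cx - 1) cy mx my (moves - 1) (by omega)]
                exact if_congr (by omega) rfl rfl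
              · rw [if_neg h1]
                by_cases h2 : cy < my
                · rw [if_pos h2]; dsimp only
                  rw [ih (cx - 1) (cy + 1) mx my (moves - 1 - 1) (by omega)]
                  exact if_congr (by omega) rfl rfl
                · rw [if_neg h2]; dsimp only
                  rw [ih (cx - 1) (cy - 1) mx my (moves - 1 - 1) (by omega)]
                  exact if_congr (by have := hy; omega) rfl rfl
    · rw [if_neg hpos, if_neg (by omega)]

theorem chaseLoop_eq (cx cy mx my moves : Int) :
    chaseLoop cx cy mx my moves =
      if (((cx - mx).natAbs + (cy - my).natAbs : Nat) : Int) < moves then "Caught!" else "Escaped!" :=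
  chaseLoop_eq_aux moves.toNat cx cy mx my moves (le_refl _)

theorem toList_append_space (s : String) : (s ++ " ").toList = s.toList ++ [' '] := by
  simp [String.toList_append]

-- ===== VERDICT (by name: the statement is the Claim_ definition above) =====
theorem cat_mouse_spec : Claim_equal_cat_mouse := by
  intro map_ moves _
  unfold Spec_cat_mouse cat_mouse cat_mouse_alt
  rw [scanMap_eq]
  simp only [Option.none_or]
  unfold toArray getIndex
  rw [toList_append_space]
  rw [getIndexAux_posOf map_.toList [] 'C' 0 (by decide) (by simp),
      getIndexAux_posOf map_.toList [] 'm' 0 (by decide) (by simp)]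
  cases hC : posOf map_.toList 'C' 0 0 with
  | none => simp [hC]
  | some pc =>
    cases hM : posOf map_.toList 'm' 0 0 with
    | none => simp [hC, hM]
    | some pm =>
      simp only [List.length_nil, hC, hM, Option.map_some, Option.getD_some,
        Int.ofNat_eq_natCast]
      rw [if_neg (by omega)]
      rw [chaseLoop_eq]
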